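-- pv_equiv track=rewrite | github.com/7211Tom/discordbot-realestate | utils/messages.py | get_recent_sold_id
-- ===== SOURCE A (Python) =====
-- def get_recent_sold_id(items):
--     sold_items = [item for item in items if item["status"] == "SOLD"]
--     if not sold_items:
--         return None
--
--     recent_item = max(
--         sold_items,
--         key=lambda item: (item.get("updated_at") or "", item["id"]),
--     )
--     return recent_item["id"]
-- ===== SOURCE B (Python) =====
-- def get_recent_sold_id(items):
--     sold = sorted(
--         (item.get("updated_at") or "", item["id"])
--         for item in items
--         if item["status"] == "SOLD"
--     )
--     return sold[-1][1] if sold else None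
-- ===== Notes on version B (the rewrite author's own statement) =====
-- stated objective: alternative
-- what changed: Replaces filter-then-max with a sort-based algorithm: build the (updated_at-or-empty, id) key tuples of the sold items, sort them, and return the id component of the last (largest) tuple; correct because the id is the second key component, so every maximal tuple carries the same id.
-- outside the precondition, e.g. on get_recent_sold_id([{'status': 'SOLD', 'id': None}]): A returns None, B returns None
import Mathlib
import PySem

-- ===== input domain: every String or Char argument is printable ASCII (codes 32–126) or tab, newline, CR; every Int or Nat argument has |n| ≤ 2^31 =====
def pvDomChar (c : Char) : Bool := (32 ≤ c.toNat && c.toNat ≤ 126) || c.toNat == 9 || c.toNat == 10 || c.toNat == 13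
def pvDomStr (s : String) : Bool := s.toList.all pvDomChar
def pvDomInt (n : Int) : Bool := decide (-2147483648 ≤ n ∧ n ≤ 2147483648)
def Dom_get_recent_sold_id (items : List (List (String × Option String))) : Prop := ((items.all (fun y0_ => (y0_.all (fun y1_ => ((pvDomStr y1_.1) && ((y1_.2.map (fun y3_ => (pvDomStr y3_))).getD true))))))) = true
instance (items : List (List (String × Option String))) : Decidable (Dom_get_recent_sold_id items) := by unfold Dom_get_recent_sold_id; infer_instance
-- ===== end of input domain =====

-- B replaces A's filter-then-max with sort-the-key-tuples-and-take-the-last; return value only, same O-ish cost class traded for a sort.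


-- ===== PORT A =====
-- dict lookup d[k] / d.get(k): first match in the association list
def pvGet (it : List (String × Option String)) (k : String) : Option (Option String) :=
  PySem.Dict.get? (⟨it⟩ : PySem.Dict String (Option String)) k

-- item.get("updated_at") or ""  (a missing key and a None value both give "")
def pvKey1 (it : List (String × Option String)) : String :=
  ((pvGet it "updated_at").getD none).getD ""

-- item["id"] as the second key component; the "" default is reached only outside Pre_ (where Python raises)
def pvKey2 (it : List (String × Option String)) : String :=
  ((pvGet it "id").getD none).getD ""

def get_recent_sold_id (items : List (List (String × Option String))) : Option String :=
  let sold_items := items.filter (fun it => pvGet it "status" == some (some "SOLD"))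
  if sold_items.isEmpty then none
  else
    match PySem.List.max2? sold_items pvKey1 pvKey2 with
    | some recent_item => (pvGet recent_item "id").getD none
    | none => none

-- ===== PORT B =====
-- sorted(<tuples>): Python's lexicographic tuple sort is PySem.List.sorted2 on the two components;
-- the generator's filter+map is List.filter + List.map; sold[-1] is pyGet? at -1.
def get_recent_sold_id_alt (items : List (List (String × Option String))) : Option String :=
  let sold := PySem.List.sorted2
      ((items.filter (fun it => pvGet it "status" == some (some "SOLD"))).map
        (fun it => (pvKey1 it, pvKey2 it)))
      Prod.fst Prod.snd
  if sold.isEmpty then none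
  else (PySem.List.pyGet? sold (-1)).map Prod.snd

-- ===== PRECONDITION & SPEC =====
-- Pre_ excludes items lacking a "status" entry (KeyError in A) and SOLD items whose "id" is missing or None
-- (KeyError, or a None in the key tuple that can make the tuple comparison raise TypeError); A returns a
-- value on a raise-free such corner (a lone SOLD item with id None) only, where both programs return None anyway.
def Pre_get_recent_sold_id (items : List (List (String × Option String))) : Prop :=
  ∀ it ∈ items, (pvGet it "status").isSome = true ∧
    (pvGet it "status" = some (some "SOLD") → ((pvGet it "id").getD none).isSome = true)
instance (items : List (List (String × Option String))) : Decidable (Pre_get_recent_sold_id items) := by unfold Pre_get_recent_sold_id; infer_instance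

def pvWitness_get_recent_sold_id : (List (List (String × Option String))) :=
  ([[("status", some "SOLD"), ("id", some "a"), ("updated_at", some "2020")],
    [("status", some "LIVE"), ("id", some "b")]])

def Spec_get_recent_sold_id (items : List (List (String × Option String))) (out : Option String) : Prop := out = get_recent_sold_id_alt items
instance (items : List (List (String × Option String))) (out : Option String) : Decidable (Spec_get_recent_sold_id items out) := by unfold Spec_get_recent_sold_id; infer_instance

-- ===== CLAIM (what is proved, stated in full; the proofs are below) =====
def Claim_equal_get_recent_sold_id : Prop := ∀ (items : List (List (String × Option String))), Dom_get_recent_sold_id items → Pre_get_recent_sold_id items → Spec_get_recent_sold_id items (get_recent_sold_id items)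

-- ===== LEMMAS AND PROOFS =====

-- the lexicographic key a sold item is compared by
def pvKey (it : List (String × Option String)) : String ×ₗ String :=
  toLex (pvKey1 it, pvKey2 it)

-- A's max2? fold step (proof-side name for the body of PySem.List.max2?)
def pvStepA (acc : Option (List (String × Option String)))
    (x : List (String × Option String)) : Option (List (String × Option String)) :=
  match acc with
  | none => some x
  | some m =>
    if (decide (pvKey1 m < pvKey1 x) || !decide (pvKey1 x < pvKey1 m) && decide (pvKey2 m < pvKey2 x)) = true
    then some x else some m

-- the same step on keys only
def pvStepK (acc : Option (String ×ₗ String)) (x : List (String × Option String)) :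
    Option (String ×ₗ String) :=
  match acc with
  | none => some (pvKey x)
  | some mk => if mk < pvKey x then some (pvKey x) else some mk

theorem pvMax2_eq (l : List (List (String × Option String))) :
    PySem.List.max2? l pvKey1 pvKey2 = l.foldl pvStepA none := by
  simp only [PySem.List.max2?]
  congr 1
  funext acc x
  cases acc <;> rfl

-- the Boolean tuple comparison shared by max2? and sorted2 decides the lexicographic order
theorem pvCond_eq (a b c d : String) :
    (decide (a < c) || (!decide (c < a) && decide (b < d)))
      = decide (toLex (a, b) < toLex (c, d)) := by
  rcases lt_trichotomy a c with h | h | h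
  · simp [Prod.Lex.lt_iff, h]
  · subst h; simp [Prod.Lex.lt_iff]
  · simp [Prod.Lex.lt_iff, lt_asymm h, h, ne_of_gt h]

-- B's tuple sort is the key sort under the lexicographic order
theorem pvSorted2_eq (ps : List (String × String)) :
    PySem.List.sorted2 ps Prod.fst Prod.snd
      = PySem.List.sorted ps (fun p => toLex p) := by
  rw [PySem.List.sorted_eq_foldl_insertBy]
  show ps.foldl (fun acc x => PySem.List.insertBy _ x acc) [] = _
  congr 1
  funext acc x
  congr 1
  funext a b
  exact pvCond_eq a.1 a.2 b.1 b.2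

-- the key of A's max2? state: the fold commutes with taking the key
theorem pvMax2_key (l : List (List (String × Option String)))
    (acc : Option (List (String × Option String))) :
    Option.map pvKey (l.foldl pvStepA acc) = l.foldl pvStepK (Option.map pvKey acc) := by
  induction l generalizing acc with
  | nil => rfl
  | cons x t ih =>
    simp only [List.foldl_cons]
    rw [ih]
    congr 1
    cases acc with
    | none => rfl
    | some m =>
      simp only [pvStepA, pvStepK, Option.map_some]
      rw [pvCond_eq (pvKey1 m) (pvKey2 m) (pvKey1 x) (pvKey2 x)]
      by_cases hc : toLex (pvKey1 m, pvKey2 m) < toLex (pvKey1 x, pvKey2 x)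
      · simp [pvKey, hc]
      · simp [pvKey, hc]

-- A's max2? result is an element of the list
theorem pvMax2_mem (l : List (List (String × Option String)))
    (acc : Option (List (String × Option String))) (m : List (String × Option String))
    (h : l.foldl pvStepA acc = some m) :
    acc = some m ∨ m ∈ l := by
  induction l generalizing acc with
  | nil => exact Or.inl h
  | cons x t ih =>
    simp only [List.foldl_cons] at h
    rcases ih _ h with h' | h'
    · cases acc with
      | none =>
        simp only [pvStepA] at h'
        exact Or.inr (List.mem_cons.mpr (Or.inl (Option.some.inj h').symm))
      | some a =>
        simp only [pvStepA] at h'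
        split at h'
        · exact Or.inr (List.mem_cons.mpr (Or.inl (Option.some.inj h').symm))
        · exact Or.inl h'
    · exact Or.inr (List.mem_cons_of_mem _ h')

-- the key fold is the running maximum of the keys
theorem pvFoldK_max (l : List (List (String × Option String))) (mk : String ×ₗ String) :
    l.foldl pvStepK (some mk) = some ((l.map pvKey).foldl max mk) := by
  induction l generalizing mk with
  | nil => rfl
  | cons x t ih =>
    simp only [List.foldl_cons, List.map_cons, pvStepK]
    by_cases h : mk < pvKey x
    · rw [if_pos h, ih, max_eq_right (le_of_lt h)]
    · rw [if_neg h, ih, max_eq_left (le_of_not_gt h)]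

theorem get_recent_sold_id_eq_alt (items : List (List (String × Option String)))
    (hpre : Pre_get_recent_sold_id items) :
    get_recent_sold_id items = get_recent_sold_id_alt items := by
  simp only [get_recent_sold_id, get_recent_sold_id_alt]
  set sold := items.filter (fun it => pvGet it "status" == some (some "SOLD")) with hsold
  have hmemsold : ∀ it ∈ sold, it ∈ items := fun it h => List.mem_of_mem_filter h
  rw [pvSorted2_eq]
  set ps := sold.map (fun it => (pvKey1 it, pvKey2 it)) with hps
  set s := PySem.List.sorted ps (fun p => toLex p) with hs
  cases hsc : sold with
  | nil =>
    have hpsn : ps = [] := by simp [hps, hsc]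
    have hsnil : s = [] := by
      rw [hs, hpsn]; exact (PySem.List.sorted_eq_nil_iff _ _ _).mpr rfl
    rw [← hsc]
    simp [hsc, hsnil]
  | cons x t =>
    -- A side: the max2? result and its key
    set M : String ×ₗ String := ((t.map pvKey).foldl max (pvKey x)) with hM
    have hkey : Option.map pvKey (PySem.List.max2? sold pvKey1 pvKey2) = some M := by
      rw [pvMax2_eq, hsc, List.foldl_cons]
      have hst : pvStepA none x = some x := rfl
      rw [hst, pvMax2_key t (some x), Option.map_some, pvFoldK_max]
    obtain ⟨mA, hmA, hkA⟩ : ∃ mA, PySem.List.max2? sold pvKey1 pvKey2 = some mA ∧ pvKey mA = M := by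
      cases hmx : PySem.List.max2? sold pvKey1 pvKey2 with
      | none => rw [hmx] at hkey; exact absurd hkey (by simp)
      | some mA => rw [hmx] at hkey; exact ⟨mA, rfl, by simpa using hkey⟩
    have hMmax : ∀ q ∈ sold.map pvKey, q ≤ M := by
      intro q hq
      rw [hsc, List.map_cons] at hq
      rcases List.mem_cons.mp hq with h | h
      · subst h; exact (PySem.List.le_foldl_max (t.map pvKey) (pvKey x)).1
      · exact (PySem.List.le_foldl_max (t.map pvKey) (pvKey x)).2 q h
    have hMmem : M ∈ sold.map pvKey := by
      rw [hsc, List.map_cons]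
      rcases PySem.List.foldl_max_mem (t.map pvKey) (pvKey x) with h | h
      · rw [hM, h]; exact List.mem_cons_self
      · exact List.mem_cons_of_mem _ (hM ▸ h)
    -- B side: the last element of the sorted key list
    have hpsne : ps ≠ [] := by simp [hps, hsc]
    have hsne : s ≠ [] := by
      rw [hs]; intro h; exact hpsne ((PySem.List.sorted_eq_nil_iff _ _ _).mp h)
    have hlen : 0 < s.length := List.length_pos_iff.mpr hsne
    set L := s[s.length - 1] with hL
    have hLmem : L ∈ ps := by
      have : L ∈ s := List.getElem_mem _
      rw [hs] at this; exact (PySem.List.mem_sorted _ _ _ _).mp this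
    have hLmax : ∀ q ∈ ps, toLex q ≤ toLex L := by
      intro q hq
      have hqs : q ∈ s := (PySem.List.mem_sorted ps (fun p => toLex p) false q).mpr hq
      obtain ⟨i, hi, hqi⟩ := List.mem_iff_getElem.mp hqs
      have := PySem.List.key_sorted_getElem_mono (xs := ps) (key := fun p => toLex p)
        (p := i) (q := s.length - 1) (by omega) (by rw [← hs]; omega)
      simp only [← hs] at this
      simpa [hqi, ← hL] using this
    -- the two maxima coincide
    have hML : M = toLex L := by
      apply le_antisymm
      · obtain ⟨it, hit, hq⟩ := List.mem_map.mp hMmem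
        have hmem : (pvKey1 it, pvKey2 it) ∈ ps := List.mem_map.mpr ⟨it, hit, rfl⟩
        have := hLmax _ hmem
        rw [← hq]; exact this
      · obtain ⟨it, hit, hpit⟩ := List.mem_map.mp hLmem
        have hle : pvKey it ≤ M := hMmax _ (List.mem_map_of_mem hit)
        have hkL : pvKey it = toLex L := by rw [pvKey, hpit]
        rw [← hkL]; exact hle
    -- conclude: both sides return pvKey2 mA = L.2
    have hmA_mem : mA ∈ sold := by
      rcases pvMax2_mem sold none mA (by rw [← pvMax2_eq]; exact hmA) with h | h
      · exact absurd h (by simp)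
      · exact h
    have hid : (pvGet mA "id").getD none = some (pvKey2 mA) := by
      obtain ⟨_, hid'⟩ := hpre mA (hmemsold mA hmA_mem)
      have hstat : pvGet mA "status" = some (some "SOLD") := by
        have := List.mem_filter.mp (hsold ▸ hmA_mem)
        simpa using this.2
      obtain ⟨v, hv⟩ := Option.isSome_iff_exists.mp (hid' hstat)
      rw [hv]; simp [pvKey2, hv]
    have hL2 : L.2 = pvKey2 mA := by
      have heq : toLex (pvKey1 mA, pvKey2 mA) = toLex L := by rw [← pvKey, hkA, hML]
      have hLe : (pvKey1 mA, pvKey2 mA) = L := toLex.injective heq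
      rw [← hLe]
    have hnotempty : sold.isEmpty = false := by rw [hsc]; rfl
    have hsiempty : s.isEmpty = false := by
      cases hsl : s with
      | nil => exact absurd hsl hsne
      | cons a b => rfl
    rw [← hsc, hnotempty, hsiempty]
    simp only [Bool.false_eq_true, if_false, hmA]
    have hgetlast : PySem.List.pyGet? s (-1) = some L := by
      have h1 : 1 ≤ s.length := hlen
      simp [PySem.List.pyGet?, PySem.List.pyIdx?, h1, hL,
        List.getElem?_eq_getElem (by omega : s.length - 1 < s.length)]
    rw [hgetlast]
    simp [hid, hL2]

-- ===== VERDICT (by name: the statement is the Claim_ definition above) =====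
theorem get_recent_sold_id_spec : Claim_equal_get_recent_sold_id := by
  intro items _ hpre
  unfold Spec_get_recent_sold_id
  exact get_recent_sold_id_eq_alt items hpre
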